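-- pv_equiv track=rewrite | github.com/bmanandhar/python-practice | twoLowest.py | twoLowest
-- ===== SOURCE A (Python) =====
-- def twoLowest(num):
--
--     if num[0] < num[1]:
--         n1, n2 = num[0], num[1]
--     else: n1, n2 = num[1], num[0]
--
--     for i in range(2, len(num)):
--
--         if num[i] < n1: n2, n1 = n1, num[i]
--         elif num[i] < n2: n2 = num[i]
--
--     num = n1 + n2
--     return num
-- ===== SOURCE B (Python) =====
-- def twoLowest(num):
--     s = sorted(num)
--     return s[0] + s[1]
-- ===== Notes on version B (the rewrite author's own statement) =====
-- stated objective: simpler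
-- what changed: B sorts the list and adds its first two elements instead of A's single pass maintaining two running minima; explicit indexing of the two smallest keeps the IndexError on lists shorter than 2.
-- outside the precondition, e.g. on twoLowest([1]): A raises IndexError, B raises IndexError; on twoLowest([]): A raises IndexError, B raises IndexError
import Mathlib
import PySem

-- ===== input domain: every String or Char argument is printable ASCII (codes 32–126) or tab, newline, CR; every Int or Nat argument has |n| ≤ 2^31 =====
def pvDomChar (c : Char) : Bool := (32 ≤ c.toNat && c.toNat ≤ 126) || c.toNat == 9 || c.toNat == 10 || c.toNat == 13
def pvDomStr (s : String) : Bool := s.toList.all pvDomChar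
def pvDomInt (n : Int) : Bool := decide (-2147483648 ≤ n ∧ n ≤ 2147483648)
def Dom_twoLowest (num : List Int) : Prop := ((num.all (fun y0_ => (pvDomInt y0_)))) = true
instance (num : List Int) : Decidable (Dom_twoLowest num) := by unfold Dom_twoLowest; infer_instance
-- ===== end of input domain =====

-- B sorts the list and indexes the two smallest instead of A's one-pass pair of running minima (simpler).
-- ===== PORT A =====
-- loop body of A's for-loop, named for the proofs (same branches, same order)
def twoLowestStep (s : Int × Int) (x : Int) : Int × Int :=
  if x < s.1 then (x, s.1)
  else if x < s.2 then (s.1, x)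
  else s

def twoLowest (num : List Int) : Int :=
  let init : Int × Int :=
    if PySem.List.pyGetD num 0 0 < PySem.List.pyGetD num 1 0 then
      (PySem.List.pyGetD num 0 0, PySem.List.pyGetD num 1 0)
    else (PySem.List.pyGetD num 1 0, PySem.List.pyGetD num 0 0)
  let p := (PySem.List.pyRange 2 (num.length : Int) 1).foldl
    (fun s i => twoLowestStep s (PySem.List.pyGetD num i 0)) init
  p.1 + p.2

-- ===== PORT B =====
def twoLowest_alt (num : List Int) : Int :=
  let s := PySem.List.sorted num (fun x => x) false
  PySem.List.pyGetD s 0 0 + PySem.List.pyGetD s 1 0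

-- ===== PRECONDITION & SPEC =====
-- Pre_: A raises IndexError (num[0]/num[1]) on lists of length < 2; B raises there too.
def Pre_twoLowest (num : List Int) : Prop := 2 ≤ num.length
instance (num : List Int) : Decidable (Pre_twoLowest num) := by unfold Pre_twoLowest; infer_instance
def pvWitness_twoLowest : List Int := [3, 1, 2]
def Spec_twoLowest (num : List Int) (out : Int) : Prop := out = twoLowest_alt num
instance (num : List Int) (out : Int) : Decidable (Spec_twoLowest num out) := by unfold Spec_twoLowest; infer_instance

-- ===== CLAIM (what is proved, stated in full; the proofs are below) =====
def Claim_equal_twoLowest : Prop := ∀ (num : List Int), Dom_twoLowest num → Pre_twoLowest num → Spec_twoLowest num (twoLowest num)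

-- ===== LEMMAS AND PROOFS =====

-- Loop invariant: starting from a sorted pair (a, b), A's loop over t yields a sorted
-- pair (p, q) with p ≤ a, q ≤ b such that p :: q :: r is a permutation of a :: b :: t
-- for some list r all of whose elements are ≥ q.
theorem twoLowest_loop_inv : ∀ (t : List Int) (a b : Int), a ≤ b →
    ∃ r : List Int,
      (t.foldl twoLowestStep (a, b)).1 ≤ (t.foldl twoLowestStep (a, b)).2 ∧
      (t.foldl twoLowestStep (a, b)).1 ≤ a ∧
      (t.foldl twoLowestStep (a, b)).2 ≤ b ∧
      ((t.foldl twoLowestStep (a, b)).1 :: (t.foldl twoLowestStep (a, b)).2 :: r).Perm (a :: b :: t) ∧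
      (∀ y ∈ r, (t.foldl twoLowestStep (a, b)).2 ≤ y) := by
  intro t
  induction t with
  | nil =>
    intro a b hab
    exact ⟨[], hab, le_refl _, le_refl _, List.Perm.refl _, by simp⟩
  | cons x t ih =>
    intro a b hab
    simp only [List.foldl_cons]
    by_cases h1 : x < a
    · -- new pair (x, a), discard b
      have hs : twoLowestStep (a, b) x = (x, a) := by
        simp [twoLowestStep, h1]
      rw [hs]
      obtain ⟨r, hle, hpa, hqb, hperm, hr⟩ := ih x a (le_of_lt h1)
      refine ⟨b :: r, hle, le_trans hpa (le_of_lt h1), le_trans hqb hab, ?_, ?_⟩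
      · rw [List.perm_iff_count]; intro z
        have hc := hperm.count_eq z
        simp [List.count_cons] at hc ⊢
        omega
      · intro y hy
        simp only [List.mem_cons] at hy
        rcases hy with rfl | hy
        · exact le_trans hqb hab
        · exact hr y hy
    · by_cases h2 : x < b
      · -- new pair (a, x), discard b
        have hs : twoLowestStep (a, b) x = (a, x) := by
          simp [twoLowestStep, h1, h2]
        rw [hs]
        obtain ⟨r, hle, hpa, hqb, hperm, hr⟩ := ih a x (not_lt.mp h1)
        refine ⟨b :: r, hle, hpa, le_trans hqb (le_of_lt h2), ?_, ?_⟩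
        · rw [List.perm_iff_count]; intro z
          have hc := hperm.count_eq z
          simp [List.count_cons] at hc ⊢
          omega
        · intro y hy
          simp only [List.mem_cons] at hy
          rcases hy with rfl | hy
          · exact le_trans hqb (le_of_lt h2)
          · exact hr y hy
      · -- pair unchanged, discard x
        have hs : twoLowestStep (a, b) x = (a, b) := by
          simp [twoLowestStep, h1, h2]
        rw [hs]
        obtain ⟨r, hle, hpa, hqb, hperm, hr⟩ := ih a b hab
        refine ⟨x :: r, hle, hpa, hqb, ?_, ?_⟩
        · rw [List.perm_iff_count]; intro z
          have hc := hperm.count_eq z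
          simp [List.count_cons] at hc ⊢
          omega
        · intro y hy
          simp only [List.mem_cons] at hy
          rcases hy with rfl | hy
          · exact le_trans hqb (not_lt.mp h2)
          · exact hr y hy

-- If p::q::r is a permutation of l, p ≤ q, and every element of r is ≥ q,
-- then sorted(l) starts with p, q.
theorem sorted_head2 (l r : List Int) (p q : Int)
    (hperm : (p :: q :: r).Perm l) (hpq : p ≤ q) (hr : ∀ y ∈ r, q ≤ y) :
    PySem.List.sorted l (fun x => x) false
      = p :: q :: PySem.List.sorted r (fun x => x) false := by
  apply PySem.List.sorted_id_eq_of_perm_of_pairwise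
  · exact List.Perm.trans
      (List.Perm.cons p (List.Perm.cons q (PySem.List.sorted_perm r (fun x => x) false)))
      hperm
  · constructor
    · intro y hy
      simp only [List.mem_cons] at hy
      rcases hy with rfl | hy
      · exact hpq
      · exact le_trans hpq (hr y ((PySem.List.mem_sorted _ _ _ _).mp hy))
    · constructor
      · intro y hy
        exact hr y ((PySem.List.mem_sorted _ _ _ _).mp hy)
      · exact PySem.List.sorted_pairwise r (fun x => x)

theorem twoLowest_spec : Claim_equal_twoLowest := by
  unfold Claim_equal_twoLowest Spec_twoLowest Pre_twoLowest
  intro num _ hlen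
  match num with
  | a :: b :: t =>
    have hget0 : PySem.List.pyGetD (a :: b :: t) 0 0 = a := by
      simp [PySem.List.pyGetD]
    have hget1 : PySem.List.pyGetD (a :: b :: t) 1 0 = b := by
      simp [PySem.List.pyGetD]
    have hdrop : (a :: b :: t).drop ((2 : Int).toNat) = t := rfl
    have hfold : ∀ init : Int × Int,
        (PySem.List.pyRange 2 ((a :: b :: t).length : Int) 1).foldl
          (fun s i => twoLowestStep s (PySem.List.pyGetD (a :: b :: t) i 0)) init
        = t.foldl twoLowestStep init := by
      intro init
      rw [PySem.List.foldl_pyRange_pyGetD' (a :: b :: t) 0 twoLowestStep init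
        (by norm_num : (0 : Int) ≤ 2)]
      rw [hdrop]
    -- the initial sorted pair
    set a0 : Int := if a < b then a else b with ha0
    set b0 : Int := if a < b then b else a with hb0
    have hab : a0 ≤ b0 := by
      rw [ha0, hb0]; split_ifs with h
      · exact le_of_lt h
      · exact not_lt.mp h
    have hA : twoLowest (a :: b :: t)
        = (t.foldl twoLowestStep (a0, b0)).1 + (t.foldl twoLowestStep (a0, b0)).2 := by
      simp only [twoLowest, hget0, hget1]
      split_ifs with h
      · rw [hfold (a, b)]
        simp [ha0, hb0, h]
      · rw [hfold (b, a)]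
        simp [ha0, hb0, h]
    obtain ⟨r, hle, _, _, hperm, hr⟩ := twoLowest_loop_inv t a0 b0 hab
    have hperm' : ((t.foldl twoLowestStep (a0, b0)).1 :: (t.foldl twoLowestStep (a0, b0)).2 :: r).Perm
        (a :: b :: t) := by
      refine hperm.trans ?_
      rw [List.perm_iff_count]; intro z
      rw [ha0, hb0]
      split_ifs <;> (simp [List.count_cons]; try omega)
    have hsorted := sorted_head2 (a :: b :: t) r _ _ hperm' hle hr
    unfold twoLowest_alt
    rw [hsorted, hA]
    simp [PySem.List.pyGetD]
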